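-- pv_equiv track=rewrite | github.com/abdirakhman/Innopolis-Intern | ClearingDuplicates/main.py | number_eq
-- ===== SOURCE A (Python) =====
-- def number_eq(x, y):
--     tmp = [""] * 2
--     for it in range(2):
--         for ch in x:
--             if (ch >= '0' and ch <= '9'):
--                 tmp[it] = tmp[it] + ch
--         x, y = y, x
--     return tmp[0] == tmp[1]
-- ===== SOURCE B (Python) =====
-- from itertools import zip_longest
--
--
-- def number_eq(x, y):
--     gx = (ch for ch in x if '0' <= ch <= '9')
--     gy = (ch for ch in y if '0' <= ch <= '9')
--     sentinel = object()
--     return all(a == b for a, b in zip_longest(gx, gy, fillvalue=sentinel))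
-- ===== Notes on version B (the rewrite author's own statement) =====
-- stated objective: alternative
-- what changed: B compares the two digit subsequences lazily in one interleaved streaming pass with early exit on the first mismatch, instead of A's building of two full digit strings followed by a string equality test.
import Mathlib
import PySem

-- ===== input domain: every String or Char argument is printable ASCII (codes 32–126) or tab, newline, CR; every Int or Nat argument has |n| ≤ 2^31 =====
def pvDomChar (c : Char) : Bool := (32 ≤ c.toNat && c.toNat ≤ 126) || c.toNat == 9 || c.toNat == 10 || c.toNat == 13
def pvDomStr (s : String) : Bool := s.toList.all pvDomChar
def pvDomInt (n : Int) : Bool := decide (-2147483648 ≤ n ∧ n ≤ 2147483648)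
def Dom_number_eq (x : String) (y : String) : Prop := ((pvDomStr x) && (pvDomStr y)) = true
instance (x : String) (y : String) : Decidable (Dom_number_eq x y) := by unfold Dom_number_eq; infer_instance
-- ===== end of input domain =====

-- B is an alternative of the same cost: one interleaved streaming comparison of the two
-- digit subsequences with early exit, instead of A's two accumulation passes + equality test.

-- ===== PORT A =====
-- A: tmp = ["",""]; two iterations of the outer loop, appending each digit of the current x
-- to tmp[it], then swapping x and y; finally tmp[0] == tmp[1].  The pair of accumulated
-- strings is the pair component-chosen by 'it == 0'.
def number_eq (x : String) (y : String) : Bool :=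
  let st := (PySem.List.pyRange 0 2 1).foldl
    (fun (st : (List Char × List Char) × List Char × List Char) it =>
      let tmp := st.1
      let xs := st.2.1
      let ys := st.2.2
      let tmp' := xs.foldl
        (fun t ch =>
          if '0' ≤ ch ∧ ch ≤ '9' then
            (if it == 0 then (t.1 ++ [ch], t.2) else (t.1, t.2 ++ [ch]))
          else t) tmp
      (tmp', ys, xs))
    (([], []), x.toList, y.toList)
  st.1.1 == st.1.2

-- ===== PORT B =====
-- next digit of the stream: first ch with '0' <= ch <= '9', together with the rest
def neB_next : List Char → Option (Char × List Char)
  | [] => none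
  | c :: rest => if '0' ≤ c ∧ c ≤ '9' then some (c, rest) else neB_next rest

theorem neB_next_lt : ∀ (xs : List Char) (c : Char) (rest : List Char),
    neB_next xs = some (c, rest) → rest.length < xs.length := by
  intro xs
  induction xs with
  | nil => intro c rest h; simp [neB_next] at h
  | cons a t ih =>
    intro c rest h
    simp only [neB_next] at h
    split_ifs at h with hp
    · cases h; simp
    · exact Nat.lt_trans (ih c rest h) (by simp)

-- the interleaved pass: pull one digit from each stream, compare, stop on mismatch
def neB_loop (xs ys : List Char) : Bool :=
  match hx : neB_next xs, hy : neB_next ys with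
  | none, none => true
  | some (a, xs'), some (b, ys') => a == b && neB_loop xs' ys'
  | _, _ => false
termination_by xs.length + ys.length
decreasing_by
  exact Nat.add_lt_add (neB_next_lt _ _ _ hx) (neB_next_lt _ _ _ hy)

def number_eq_alt (x : String) (y : String) : Bool :=
  neB_loop x.toList y.toList

-- ===== PRECONDITION & SPEC =====
def Spec_number_eq (x : String) (y : String) (out : Bool) : Prop := out = number_eq_alt x y
instance (x : String) (y : String) (out : Bool) : Decidable (Spec_number_eq x y out) := by unfold Spec_number_eq; infer_instance

-- ===== CLAIM (what is proved, stated in full; the proofs are below) =====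
def Claim_equal_number_eq : Prop := ∀ (x : String) (y : String), Dom_number_eq x y → Spec_number_eq x y (number_eq x y)

-- ===== LEMMAS AND PROOFS =====

def neDig (ch : Char) : Bool := decide ('0' ≤ ch ∧ ch ≤ '9')

theorem ne_fold_fst : ∀ (xs : List Char) (ab : List Char × List Char),
    xs.foldl (fun t ch => if '0' ≤ ch ∧ ch ≤ '9' then (t.1 ++ [ch], t.2) else t) ab
      = (ab.1 ++ xs.filter neDig, ab.2) := by
  intro xs
  induction xs with
  | nil => intro ab; simp
  | cons a t ih =>
    intro ab
    by_cases hp : '0' ≤ a ∧ a ≤ '9'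
    · simp only [List.foldl_cons, if_pos hp]; rw [ih]
      simp [neDig, hp]
    · simp only [List.foldl_cons, if_neg hp]; rw [ih]
      simp [neDig, hp]

theorem ne_fold_snd : ∀ (xs : List Char) (ab : List Char × List Char),
    xs.foldl (fun t ch => if '0' ≤ ch ∧ ch ≤ '9' then (t.1, t.2 ++ [ch]) else t) ab
      = (ab.1, ab.2 ++ xs.filter neDig) := by
  intro xs
  induction xs with
  | nil => intro ab; simp
  | cons a t ih =>
    intro ab
    by_cases hp : '0' ≤ a ∧ a ≤ '9'
    · simp only [List.foldl_cons, if_pos hp]; rw [ih]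
      simp [neDig, hp]
    · simp only [List.foldl_cons, if_neg hp]; rw [ih]
      simp [neDig, hp]

theorem number_eq_eq_filter (x y : String) :
    number_eq x y = (x.toList.filter neDig == y.toList.filter neDig) := by
  have hr : PySem.List.pyRange 0 2 1 = [0, 1] := by decide
  unfold number_eq
  rw [hr]
  simp only [List.foldl_cons, List.foldl_nil]
  have h0 : (((0 : Int) == 0) = true) = True := by simp
  have h1 : (((1 : Int) == 0) = true) = False := by simp
  simp only [h0, h1, if_true, if_false]
  rw [ne_fold_fst x.toList (([], []) : List Char × List Char)]
  rw [ne_fold_snd y.toList]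
  simp

theorem neB_next_none (xs : List Char) (h : neB_next xs = none) :
    xs.filter neDig = [] := by
  induction xs with
  | nil => simp
  | cons a t ih =>
    by_cases hp : '0' ≤ a ∧ a ≤ '9'
    · rw [neB_next, if_pos hp] at h; exact absurd h (by simp)
    · rw [neB_next, if_neg hp] at h
      simp only [List.filter_cons]
      rw [if_neg (by simpa [neDig] using hp)]
      exact ih h

theorem neB_next_some : ∀ (xs : List Char) (c : Char) (rest : List Char),
    neB_next xs = some (c, rest) → xs.filter neDig = c :: rest.filter neDig := by
  intro xs
  induction xs with
  | nil => intro c rest h; simp [neB_next] at h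
  | cons a t ih =>
    intro c rest h
    simp only [neB_next] at h
    split_ifs at h with hp
    · cases h
      simp only [List.filter_cons]
      rw [if_pos (by simpa [neDig] using hp)]
    · simp only [List.filter_cons]
      rw [if_neg (by simpa [neDig] using hp)]
      exact ih c rest h

theorem neB_loop_eq_filter_aux : ∀ (n : Nat) (xs ys : List Char), xs.length + ys.length ≤ n →
    neB_loop xs ys = (xs.filter neDig == ys.filter neDig) := by
  intro n
  induction n with
  | zero =>
    intro xs ys hb
    have hx0 : xs = [] := List.eq_nil_of_length_eq_zero (by omega)
    have hy0 : ys = [] := List.eq_nil_of_length_eq_zero (by omega)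
    subst hx0; subst hy0
    rw [neB_loop]; simp [neB_next]
  | succ n ih =>
    intro xs ys hb
    rw [neB_loop]
    split
    · rename_i hx hy
      simp [neB_next_none xs hx, neB_next_none ys hy]
    · rename_i a xs' b ys' hx hy
      rw [ih xs' ys' (by
        have h1 := neB_next_lt xs a xs' hx
        have h2 := neB_next_lt ys b ys' hy
        omega)]
      rw [neB_next_some xs a xs' hx, neB_next_some ys b ys' hy]
      by_cases hab : a = b <;> simp [hab]
    · rename_i hnn hns
      cases hvx : neB_next xs with
      | none =>
        cases hvy : neB_next ys with
        | none => exact (hnn hvx hvy).elim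
        | some q =>
          obtain ⟨b, ys'⟩ := q
          simp [neB_next_none xs hvx, neB_next_some ys b ys' hvy]
      | some p =>
        obtain ⟨a, xs'⟩ := p
        cases hvy : neB_next ys with
        | none => simp [neB_next_none ys hvy, neB_next_some xs a xs' hvx]
        | some q =>
          obtain ⟨b, ys'⟩ := q
          exact (hns a xs' b ys' hvx hvy).elim

theorem neB_loop_eq_filter (xs ys : List Char) :
    neB_loop xs ys = (xs.filter neDig == ys.filter neDig) :=
  neB_loop_eq_filter_aux (xs.length + ys.length) xs ys (le_refl _)

-- ===== VERDICT (by name: the statement is the Claim_ definition above) =====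
theorem number_eq_spec : Claim_equal_number_eq := by
  intro x y _
  unfold Spec_number_eq number_eq_alt
  rw [number_eq_eq_filter, neB_loop_eq_filter]
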